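-- pv_equiv track=rewrite | github.com/anastasiaberyoza/python3 | Alpha1_str_to_arr.py | str_to_arr
-- ===== SOURCE A (Python) =====
-- def str_to_arr(string):
--     """This function receives a string on input,
--     and on output it gives an array of
--     alphabetical chains in this string"""
--
--     array = []
--     number = 0
--     if len(string) == 0:
--         array = []
--     else:
--         for i, char in enumerate(string):
--             if char.isalpha():
--                 # the first char can be the first alphabetical char in the string
--                 # if the previous char is not alphabetical, then
--                 # we remember the current char as the first in the alphabetical chain
--                 if ((i == 0) or not (string[i-1].isalpha())):
--                     number = i
--                 # if char is non-alpha nd its index is more than 0 and the previous one is alpha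
--                 # Therefore it is the end of the alphabetical substring
--                 # If the previous character is non-alpha as well, we move on
--             if not char.isalpha():
--                 if ((i > 0) and (string[i-1].isalpha())):
--                     array.append(string[number:i])
--                 else:
--                     number = i + 1
--         # The part below adds the last alphabetical substring in the array
--         # if the current char is alphabetical, it means that there is no char after it
--         # But our cycle needs the next non-alpha char so as to add the aplhabetical substring
--         if char.isalpha():
--             array.append(string[number:])
--     return (array)
-- ===== SOURCE B (Python) =====
-- def str_to_arr(string):
--     """Single pass with a running buffer instead of index tracking and slicing."""
--     array = []
--     current = ''
--     for char in string:
--         if char.isalpha():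
--             current += char
--         elif current:
--             array.append(current)
--             current = ''
--     if current:
--         array.append(current)
--     return array
-- ===== Notes on version B (the rewrite author's own statement) =====
-- stated objective: simpler
-- what changed: Replaces the start-index bookkeeping with previous-character peeks and slicing by a single pass that grows a buffer string and flushes it at each alpha/non-alpha boundary and at the end.
import Mathlib
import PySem

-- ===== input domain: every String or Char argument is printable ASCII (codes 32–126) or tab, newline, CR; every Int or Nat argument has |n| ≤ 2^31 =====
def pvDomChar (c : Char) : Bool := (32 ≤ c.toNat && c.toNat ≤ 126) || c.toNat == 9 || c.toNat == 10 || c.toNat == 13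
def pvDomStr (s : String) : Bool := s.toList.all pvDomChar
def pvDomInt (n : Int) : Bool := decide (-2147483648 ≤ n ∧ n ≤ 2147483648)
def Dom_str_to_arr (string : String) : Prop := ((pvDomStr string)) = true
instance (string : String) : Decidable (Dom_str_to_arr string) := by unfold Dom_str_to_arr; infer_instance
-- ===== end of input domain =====

-- B replaces A's start-index bookkeeping + previous-char peeks + slicing by one
-- buffer-accumulating pass (objective: simpler).

-- ===== PORT A =====
-- A's loop body for one (i, char) of enumerate(string): state = (array, number)
def pvStepA (cs : List Char) (st : List (List Char) × Int) (ic : Int × Char) :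
    List (List Char) × Int :=
  let array := st.1
  let number := st.2
  let i := ic.1
  let c := ic.2
  let number :=
    if PySem.Chars.isalpha c then
      (if i == 0 || !(PySem.Chars.isalpha (PySem.List.pyGetD cs (i - 1) ' ')) then i else number)
    else number
  if !(PySem.Chars.isalpha c) then
    if i > 0 && PySem.Chars.isalpha (PySem.List.pyGetD cs (i - 1) ' ') then
      (array ++ [PySem.List.slice cs (some number) (some i)], number)
    else
      (array, i + 1)
  else (array, number)

def str_to_arr (string : String) : List String :=
  let cs := string.toList
  if cs.length == 0 then []
  else
    let st := (PySem.List.enumerate cs 0).foldl (pvStepA cs) ([], 0)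
    let array :=
      match cs.getLast? with          -- `char` after the loop is the last character
      | some c =>
          if PySem.Chars.isalpha c then st.1 ++ [PySem.List.slice cs (some st.2) none] else st.1
      | none => st.1
    array.map String.ofList

-- ===== PORT B =====
-- B's loop body for one char: state = (array, current buffer)
def pvStepB (st : List (List Char) × List Char) (c : Char) : List (List Char) × List Char :=
  if PySem.Chars.isalpha c then (st.1, st.2 ++ [c])
  else if st.2 ≠ [] then (st.1 ++ [st.2], []) else (st.1, st.2)

def str_to_arr_alt (string : String) : List String :=
  let st := string.toList.foldl pvStepB ([], [])
  (if st.2 ≠ [] then st.1 ++ [st.2] else st.1).map String.ofList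

-- ===== PRECONDITION & SPEC =====
def Spec_str_to_arr (string : String) (out : List String) : Prop := out = str_to_arr_alt string
instance (string : String) (out : List String) : Decidable (Spec_str_to_arr string out) := by unfold Spec_str_to_arr; infer_instance

-- ===== CLAIM (what is proved, stated in full; the proofs are below) =====
def Claim_equal_str_to_arr : Prop := ∀ (string : String), Dom_str_to_arr string → Spec_str_to_arr string (str_to_arr string)

-- ===== LEMMAS AND PROOFS =====

-- Invariant linking A's (array, number) with B's (array, current) after the
-- first `pre.length` characters have been processed.
def pvInv (cs pre : List Char) (number : Int) (cur : List Char) : Prop :=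
  match pre.getLast? with
  | none => cur = []
  | some p =>
      if PySem.Chars.isalpha p then
        0 ≤ number ∧ number.toNat ≤ pre.length ∧
          cur = (cs.drop number.toNat).take (pre.length - number.toNat) ∧ cur ≠ []
      else cur = []

lemma pvPrev_eval (pre rest : List Char) (p : Char) (hp : pre.getLast? = some p) :
    PySem.List.pyGetD (pre ++ rest) ((pre.length : Int) - 1) ' ' = p := by
  have hne : pre ≠ [] := by intro h; simp [h] at hp
  have hlen : 0 < pre.length := List.length_pos_iff.mpr hne
  rw [PySem.List.pyGetD_of_nonneg (pre ++ rest) ' ' (by omega)]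
  have ht : ((pre.length : Int) - 1).toNat = pre.length - 1 := by omega
  rw [ht, List.getD_eq_getElem?_getD, List.getElem?_append_left (by omega),
    ← List.getLast?_eq_getElem?, hp]
  rfl

-- the last flush: A's final append equals B's
lemma pvFinal (cs : List Char) (arr : List (List Char)) (number : Int) (cur : List Char)
    (hinv : pvInv cs cs number cur) :
    (match cs.getLast? with
      | some c =>
          if PySem.Chars.isalpha c then arr ++ [PySem.List.slice cs (some number) none] else arr
      | none => arr)
      = (if cur ≠ [] then arr ++ [cur] else arr) := by
  unfold pvInv at hinv
  cases hlast : cs.getLast? with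
  | none => rw [hlast] at hinv; simp [hinv]
  | some p =>
      rw [hlast] at hinv
      by_cases hA : PySem.Chars.isalpha p = true
      · obtain ⟨h0, hle, hcur, hne⟩ :
            0 ≤ number ∧ number.toNat ≤ cs.length ∧
              cur = (cs.drop number.toNat).take (cs.length - number.toNat) ∧ cur ≠ [] := by
          simpa [hA] using hinv
        have hdl : (cs.drop number.toNat).length = cs.length - number.toNat := by simp
        have hc : cur = cs.drop number.toNat := by
          rw [hcur, List.take_of_length_le (by omega)]
        show (if PySem.Chars.isalpha p = true
            then arr ++ [PySem.List.slice cs (some number) none] else arr) = _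
        rw [if_pos hA, if_pos hne, PySem.List.slice_from cs h0, hc]
      · have hc : cur = [] := by simpa [hA] using hinv
        show (if PySem.Chars.isalpha p = true
            then arr ++ [PySem.List.slice cs (some number) none] else arr) = _
        rw [if_neg hA, hc]
        simp

lemma pvLoop (cs : List Char) :
    ∀ (rest pre : List Char) (arr : List (List Char)) (number : Int) (cur : List Char),
      cs = pre ++ rest → pvInv cs pre number cur →
      (let st := (PySem.List.enumerate rest (pre.length : Int)).foldl (pvStepA cs) (arr, number)
       match cs.getLast? with
       | some c =>
           if PySem.Chars.isalpha c then st.1 ++ [PySem.List.slice cs (some st.2) none] else st.1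
       | none => st.1)
        = (let st := rest.foldl pvStepB (arr, cur)
           if st.2 ≠ [] then st.1 ++ [st.2] else st.1) := by
  intro rest
  induction rest with
  | nil =>
      intro pre arr number cur hcs hinv
      simp only [PySem.List.enumerate, List.foldl_nil]
      have : cs = pre := by simpa using hcs
      exact pvFinal cs arr number cur (this ▸ hinv)
  | cons c rest ih =>
      intro pre arr number cur hcs hinv
      rw [PySem.List.enumerate_cons, List.foldl_cons, List.foldl_cons]
      have hlen : ((pre.length : Int) + 1) = ((pre ++ [c]).length : Int) := by
        simp
      -- evaluate A's previous-char test at i = pre.length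
      have hprev :
          ((pre.length : Int) == 0 || !PySem.Chars.isalpha (PySem.List.pyGetD cs ((pre.length : Int) - 1) ' '))
            = (match pre.getLast? with | none => true | some p => !PySem.Chars.isalpha p) := by
        cases hlast : pre.getLast? with
        | none =>
            have : pre = [] := by
              cases pre with
              | nil => rfl
              | cons a l => simp at hlast
            simp [this]
        | some p =>
            have hne : pre ≠ [] := by intro h; simp [h] at hlast
            have hlp : 0 < pre.length := List.length_pos_iff.mpr hne
            rw [hcs, pvPrev_eval pre (c :: rest) p hlast]
            have hz : ((pre.length : Int) == 0) = false := by simp; omega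
            rw [hz]
            simp
      -- step once and apply ih with pre ++ [c]
      have hcs' : cs = (pre ++ [c]) ++ rest := by simpa using hcs
      by_cases hA : PySem.Chars.isalpha c = true
      · -- alpha char: B extends the buffer; A possibly resets number
        have hstepB : pvStepB (arr, cur) c = (arr, cur ++ [c]) := by
          simp [pvStepB, hA]
        rw [hstepB]
        cases hlast : pre.getLast? with
        | none =>
            -- pre = [], so the first-char / prev-non-alpha branch fires: number := i
            have hpre : pre = [] := by
              cases pre with
              | nil => rfl
              | cons a l => simp at hlast
            have hcur : cur = [] := by unfold pvInv at hinv; rw [hlast] at hinv; exact hinv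
            have hstepA : pvStepA cs (arr, number) ((pre.length : Int), c) =
                (arr, (pre.length : Int)) := by
              simp [pvStepA, hA, hprev, hlast]
            rw [hstepA, hlen]
            apply ih (pre ++ [c]) arr _ _ hcs'
            unfold pvInv
            subst hpre hcur
            simp [hA, hcs']
        | some p =>
            by_cases hPA : PySem.Chars.isalpha p = true
            · -- previous alpha: number unchanged, buffer grows
              have hstepA : pvStepA cs (arr, number) ((pre.length : Int), c) = (arr, number) := by
                simp [pvStepA, hA, hprev, hlast, hPA]
              rw [hstepA, hlen]
              apply ih (pre ++ [c]) arr number (cur ++ [c]) hcs'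
              unfold pvInv at hinv ⊢
              rw [hlast] at hinv
              obtain ⟨h0, hle, hcur, hne⟩ :
                  0 ≤ number ∧ number.toNat ≤ pre.length ∧
                    cur = (cs.drop number.toNat).take (pre.length - number.toNat) ∧ cur ≠ [] := by
                simpa [hPA] using hinv
              simp only [List.getLast?_concat, if_pos hA]
              refine ⟨h0, by simp; omega, ?_, by simp⟩
              have hget : cs[pre.length]? = some c := by
                rw [hcs']; rw [List.getElem?_append_left (by simp)]
                simp
              have hdrop : (cs.drop number.toNat)[pre.length - number.toNat]? = some c := by
                rw [List.getElem?_drop]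
                rw [Nat.add_sub_cancel' hle]
                exact hget
              have hl2 : (pre ++ [c]).length = pre.length + 1 := by simp
              rw [hl2, hcur]
              have hsucc : pre.length + 1 - number.toNat = (pre.length - number.toNat) + 1 := by
                omega
              rw [hsucc, List.take_add_one, hdrop]
              simp
            · -- previous non-alpha: number := i, buffer restarts as [c]
              have hcur : cur = [] := by
                unfold pvInv at hinv; rw [hlast] at hinv; simpa [hPA] using hinv
              have hstepA : pvStepA cs (arr, number) ((pre.length : Int), c) =
                  (arr, (pre.length : Int)) := by
                simp [pvStepA, hA, hprev, hlast, hPA]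
              rw [hstepA, hlen]
              apply ih (pre ++ [c]) arr _ _ hcs'
              unfold pvInv
              subst hcur
              simp only [List.getLast?_concat, if_pos hA]
              refine ⟨by positivity, by simp, ?_, by simp⟩
              have : ((pre.length : Int)).toNat = pre.length := by omega
              rw [this, hcs']
              simp
      · -- non-alpha char
        cases hlast : pre.getLast? with
        | none =>
            have hpre : pre = [] := by
              cases pre with
              | nil => rfl
              | cons a l => simp at hlast
            have hcur : cur = [] := by unfold pvInv at hinv; rw [hlast] at hinv; exact hinv
            have hstepB : pvStepB (arr, cur) c = (arr, cur) := by
              simp [pvStepB, hA, hcur]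
            have hstepA : pvStepA cs (arr, number) ((pre.length : Int), c) =
                (arr, (pre.length : Int) + 1) := by
              simp [pvStepA, hA, hpre]
            rw [hstepA, hstepB, hlen]
            apply ih (pre ++ [c]) arr _ _ hcs'
            unfold pvInv
            simp [hA, hcur]
        | some p =>
            by_cases hPA : PySem.Chars.isalpha p = true
            · -- end of an alphabetical chain: both append
              unfold pvInv at hinv
              rw [hlast] at hinv
              obtain ⟨h0, hle, hcur, hne⟩ :
                  0 ≤ number ∧ number.toNat ≤ pre.length ∧
                    cur = (cs.drop number.toNat).take (pre.length - number.toNat) ∧ cur ≠ [] := by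
                simpa [hPA] using hinv
              have hslice : PySem.List.slice cs (some number) (some (pre.length : Int)) = cur := by
                rw [PySem.List.slice_toNat cs h0 (by positivity)]
                have : ((pre.length : Int)).toNat = pre.length := by omega
                rw [this, hcur]
              have hpg : PySem.List.pyGetD cs ((pre.length : Int) - 1) ' ' = p := by
                rw [hcs]; exact pvPrev_eval pre (c :: rest) p hlast
              have hpl : 0 < pre.length :=
                List.length_pos_iff.mpr (by intro h; simp [h] at hlast)
              have hstepA : pvStepA cs (arr, number) ((pre.length : Int), c) =
                  (arr ++ [cur], number) := by
                simp [pvStepA, hA, hpg, hPA, hslice, hpl]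
              have hstepB : pvStepB (arr, cur) c = (arr ++ [cur], []) := by
                simp [pvStepB, hA, hne]
              rw [hstepA, hstepB, hlen]
              apply ih (pre ++ [c]) (arr ++ [cur]) number [] hcs'
              unfold pvInv
              simp [hA]
            · -- between chains: A advances number, B does nothing
              have hcur : cur = [] := by
                unfold pvInv at hinv; rw [hlast] at hinv; simpa [hPA] using hinv
              have hstepB : pvStepB (arr, cur) c = (arr, cur) := by
                simp [pvStepB, hA, hcur]
              have hpg : PySem.List.pyGetD cs ((pre.length : Int) - 1) ' ' = p := by
                rw [hcs]; exact pvPrev_eval pre (c :: rest) p hlast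
              have hstepA : pvStepA cs (arr, number) ((pre.length : Int), c) =
                  (arr, (pre.length : Int) + 1) := by
                simp [pvStepA, hA, hpg, hPA]
              rw [hstepA, hstepB, hlen]
              apply ih (pre ++ [c]) arr _ _ hcs'
              unfold pvInv
              simp [hA, hcur]

-- ===== VERDICT (by name: the statement is the Claim_ definition above) =====
theorem str_to_arr_spec : Claim_equal_str_to_arr := by
  intro string _
  unfold Spec_str_to_arr str_to_arr str_to_arr_alt
  cases hcs : string.toList with
  | nil => simp
  | cons a l =>
      simp only [List.length_cons, beq_iff_eq, Nat.succ_ne_zero, if_false]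
      have h := pvLoop (a :: l) (a :: l) [] [] 0 [] (by simp) (by unfold pvInv; simp)
      simp only [List.length_nil, Nat.cast_zero] at h
      simp only [h]
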